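-- pv_equiv track=rewrite | github.com/Attyuttam/cp-practice | random div A CF problems/stones_on_a_table.py | solution
-- ===== SOURCE A (Python) =====
-- def solution(n, str):
--     c = 0
--     i = 0
--     j = 1
--
--     while j < n and i <= j:
--         if str[i] == str[j]:
--             c += 1
--             j += 1
--         else:
--             i = j
--             j += 1
--     return c
-- ===== SOURCE B (Python) =====
-- def solution(n, str):
--     c = 0
--     for k in range(1, n):
--         if str[k] == str[k - 1]:
--             c += 1
--     return c
-- ===== Notes on version B (the rewrite author's own statement) =====
-- stated objective: simpler
-- what changed: Replaces the two-pointer while loop maintaining a run-start index i with a single for-loop over range(1, n) that compares each character with its predecessor.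
import Mathlib
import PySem

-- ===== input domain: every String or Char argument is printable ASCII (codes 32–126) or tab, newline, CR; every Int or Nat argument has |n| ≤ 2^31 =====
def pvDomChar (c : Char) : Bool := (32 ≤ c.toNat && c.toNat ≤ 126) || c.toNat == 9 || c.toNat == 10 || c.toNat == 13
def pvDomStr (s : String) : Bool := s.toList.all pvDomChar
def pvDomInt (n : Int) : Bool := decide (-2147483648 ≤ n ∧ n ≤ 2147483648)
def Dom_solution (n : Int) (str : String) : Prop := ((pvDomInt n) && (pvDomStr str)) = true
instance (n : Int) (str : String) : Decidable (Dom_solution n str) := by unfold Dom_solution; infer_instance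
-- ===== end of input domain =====

-- B replaces A's two-pointer run-start scheme with a plain comparison of each character to its predecessor (objective: simpler).

-- ===== PORT A =====
-- the while loop, fuel = remaining iterations bound; a failed index lookup (IndexError) is outside Pre_
def solutionAux (s : List Char) (n : Int) : Nat → Int → Int → Int → Int
  | 0, c, _, _ => c
  | fuel+1, c, i, j =>
    if j < n ∧ i ≤ j then
      match PySem.List.pyGet? s i, PySem.List.pyGet? s j with
      | some a, some b =>
        if a = b then solutionAux s n fuel (c+1) i (j+1)
        else solutionAux s n fuel c j (j+1)
      | _, _ => c
    else c

def solution (n : Int) (str : String) : Int :=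
  solutionAux str.toList n (n - 1).toNat 0 0 1

-- ===== PORT B =====
def solution_alt (n : Int) (str : String) : Int :=
  (PySem.List.pyRange 1 n 1).foldl (fun c k =>
    match PySem.List.pyGet? str.toList k, PySem.List.pyGet? str.toList (k - 1) with
    | some a, some b => if a = b then c + 1 else c
    | _, _ => c) 0

-- ===== PRECONDITION & SPEC =====
-- Pre_ excludes exactly the inputs where A raises IndexError (n beyond the string's length with a non-trivial loop)
def Pre_solution (n : Int) (str : String) : Prop := n ≤ 1 ∨ n ≤ (str.toList.length : Int)
instance (n : Int) (str : String) : Decidable (Pre_solution n str) := by unfold Pre_solution; infer_instance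
def pvWitness_solution : Int × String := (6, "aabccc")

def Spec_solution (n : Int) (str : String) (out : Int) : Prop := out = solution_alt n str
instance (n : Int) (str : String) (out : Int) : Decidable (Spec_solution n str out) := by unfold Spec_solution; infer_instance

-- ===== CLAIM (what is proved, stated in full; the proofs are below) =====
def Claim_equal_solution : Prop := ∀ (n : Int) (str : String), Dom_solution n str → Pre_solution n str → Spec_solution n str (solution n str)

-- ===== LEMMAS AND PROOFS =====

-- loop invariant: i < j, s[j-1] = s[i] (all characters of the current run are equal), indices in range
theorem solutionAux_eq_foldl (s : List Char) (n : Int) (fuel : Nat) :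
    ∀ (c i j : Int), (n - j).toNat ≤ fuel → 0 ≤ i → i < j → n ≤ (s.length : Int) →
    PySem.List.pyGet? s (j - 1) = PySem.List.pyGet? s i →
    solutionAux s n fuel c i j =
      (PySem.List.pyRange j n 1).foldl (fun c k =>
        match PySem.List.pyGet? s k, PySem.List.pyGet? s (k - 1) with
        | some a, some b => if a = b then c + 1 else c
        | _, _ => c) c := by
  induction fuel with
  | zero =>
    intro c i j hf _ _ _ _
    have hj : n ≤ j := by omega
    rw [PySem.List.pyRange_one_eq_nil hj]
    rfl
  | succ fuel ih =>
    intro c i j hf hi hij hn hinv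
    by_cases hj : j < n
    · have h0j : 0 ≤ j := by omega
      have hjlen : j < (s.length : Int) := by omega
      have hilen : i < (s.length : Int) := by omega
      have hgj := PySem.List.pyGet?_eq_some_getElem (xs := s) h0j hjlen
      have hgi := PySem.List.pyGet?_eq_some_getElem (xs := s) hi hilen
      have hcond : j < n ∧ i ≤ j := ⟨hj, le_of_lt hij⟩
      rw [PySem.List.pyRange_one_cons hj, List.foldl_cons]
      simp only [solutionAux, if_pos hcond, hgi, hgj, hinv]
      by_cases heq : s[i.toNat] = s[j.toNat]
      · rw [if_pos heq, if_pos heq.symm,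
          ih (c+1) i (j+1) (by omega) hi (by omega) hn
            (by rw [show j + 1 - 1 = j by ring, hgj, hgi, heq])]
      · rw [if_neg heq, if_neg (fun h => heq h.symm),
          ih c j (j+1) (by omega) h0j (by omega) hn
            (by rw [show j + 1 - 1 = j by ring])]
    · have hnj : n ≤ j := by omega
      rw [PySem.List.pyRange_one_eq_nil hnj]
      simp only [solutionAux, List.foldl_nil]
      rw [if_neg (by omega)]

-- ===== VERDICT (by name: the statement is the Claim_ definition above) =====
theorem solution_spec : Claim_equal_solution := by
  intro n str _ hpre
  show solution n str = solution_alt n str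
  unfold solution solution_alt
  by_cases hn : n ≤ 1
  · have hfuel : (n - 1).toNat = 0 := by omega
    rw [hfuel, PySem.List.pyRange_one_eq_nil hn]
    rfl
  · have hlen : n ≤ (str.toList.length : Int) := by
      rcases hpre with h | h
      · omega
      · exact h
    exact solutionAux_eq_foldl str.toList n (n - 1).toNat 0 0 1 (by omega)
      le_rfl (by omega) hlen (by norm_num)
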